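-- pv_equiv track=rewrite | github.com/XLPRUtils/pyxllib | src/kq5034/order_ops.py | _generate_zero_o_variants
-- ===== SOURCE A (Python) =====
-- def _generate_zero_o_variants(order_id: str) -> list[str]:
--     zero_positions = [i for i, char in enumerate(order_id) if char == "0"]
--     if not zero_positions:
--         return [order_id]
--
--     variants = []
--     for mask in range(2 ** len(zero_positions)):
--         chars = list(order_id)
--         for index, pos in enumerate(zero_positions):
--             if mask & (1 << index):
--                 chars[pos] = "O"
--         variants.append("".join(chars))
--     return variants
-- ===== SOURCE B (Python) =====
-- def _generate_zero_o_variants(order_id: str) -> list[str]: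
--     variants = [order_id]
--     zero_positions = [i for i, char in enumerate(order_id) if char == "0"]
--     for pos in reversed(zero_positions):
--         doubled = []
--         for v in variants:
--             doubled.append(v[:pos] + "0" + v[pos + 1:])
--             doubled.append(v[:pos] + "O" + v[pos + 1:])
--         variants = doubled
--     return variants
-- ===== Notes on version B (the rewrite author's own statement) =====
-- stated objective: simpler
-- what changed: Replaces bitmask counting over 2^k masks with an incremental fold: starting from the singleton list holding the order id, each zero position (processed back to front) doubles the variant list by writing the zero digit and then the letter O there, reproducing the binary-counting order of the original without any bit arithmetic.
import Mathlib
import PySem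

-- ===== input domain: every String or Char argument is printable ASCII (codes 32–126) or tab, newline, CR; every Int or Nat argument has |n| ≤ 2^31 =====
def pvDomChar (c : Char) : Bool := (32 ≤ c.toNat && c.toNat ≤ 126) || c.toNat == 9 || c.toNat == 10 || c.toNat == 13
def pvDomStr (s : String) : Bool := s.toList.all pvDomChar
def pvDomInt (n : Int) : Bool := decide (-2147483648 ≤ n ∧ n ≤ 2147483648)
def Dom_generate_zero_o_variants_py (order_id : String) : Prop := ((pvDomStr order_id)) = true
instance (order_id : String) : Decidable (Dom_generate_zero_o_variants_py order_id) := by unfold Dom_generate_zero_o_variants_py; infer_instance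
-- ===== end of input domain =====

-- B replaces A's bitmask counting with an incremental fold that doubles the
-- variant list once per zero position (objective: simpler).

-- ===== PORT A =====
-- [i for i, char in enumerate(order_id) if char == "0"]  (i carried as the second argument)
def pvZerosA : List Char → Nat → List Nat
  | [], _ => []
  | c :: cs, i => if c = '0' then i :: pvZerosA cs (i + 1) else pvZerosA cs (i + 1)

-- the inner 'for index, pos in enumerate(zero_positions)' loop mutating chars
def pvSetO : List Char → Nat → Nat → List Nat → List Char
  | cs, _, _, [] => cs
  | cs, mask, idx, p :: rest =>
      pvSetO (if mask &&& (1 <<< idx) != 0 then cs.set p 'O' else cs) mask (idx + 1) rest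

def generate_zero_o_variants_py (order_id : String) : List String :=
  let zero_positions := pvZerosA order_id.toList 0
  if zero_positions.isEmpty then [order_id]
  else
    (List.range (2 ^ zero_positions.length)).foldl
      (fun variants mask => variants ++ [String.ofList (pvSetO order_id.toList mask 0 zero_positions)]) []

-- ===== PORT B =====
def pvZerosB : List Char → Nat → List Nat
  | [], _ => []
  | c :: cs, i => if c = '0' then i :: pvZerosB cs (i + 1) else pvZerosB cs (i + 1)

-- v[:pos] + ch + v[pos+1:]  (pos is a valid nonnegative index, so take/drop is exact here)
def pvDouble (pos : Nat) (variants : List String) : List String :=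
  variants.foldl
    (fun doubled v =>
      doubled ++ [String.ofList (v.toList.take pos ++ '0' :: v.toList.drop (pos + 1)),
                  String.ofList (v.toList.take pos ++ 'O' :: v.toList.drop (pos + 1))]) []

def generate_zero_o_variants_py_alt (order_id : String) : List String :=
  (pvZerosB order_id.toList 0).reverse.foldl (fun variants pos => pvDouble pos variants) [order_id]

-- ===== PRECONDITION & SPEC =====
def Spec_generate_zero_o_variants_py (order_id : String) (out : List String) : Prop := out = generate_zero_o_variants_py_alt order_id
instance (order_id : String) (out : List String) : Decidable (Spec_generate_zero_o_variants_py order_id out) := by unfold Spec_generate_zero_o_variants_py; infer_instance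

-- ===== CLAIM (what is proved, stated in full; the proofs are below) =====
def Claim_equal_generate_zero_o_variants_py : Prop := ∀ (order_id : String), Dom_generate_zero_o_variants_py order_id → Spec_generate_zero_o_variants_py order_id (generate_zero_o_variants_py order_id)

-- ===== LEMMAS AND PROOFS =====

theorem pvZerosB_eq_A : ∀ (cs : List Char) (i : Nat), pvZerosB cs i = pvZerosA cs i := by
  intro cs
  induction cs with
  | nil => intro i; rfl
  | cons c cs ih => intro i; simp [pvZerosA, pvZerosB, ih]

theorem mem_pvZerosA : ∀ (cs : List Char) (i p : Nat), p ∈ pvZerosA cs i →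
    i ≤ p ∧ cs[p - i]? = some '0' := by
  intro cs
  induction cs with
  | nil => intro i p h; simp [pvZerosA] at h
  | cons c cs ih =>
    intro i p h
    simp only [pvZerosA] at h
    split at h
    next hc =>
      rcases List.mem_cons.mp h with h | h
      · subst h; simp [hc]
      · obtain ⟨h1, h2⟩ := ih (i + 1) p h
        refine ⟨by omega, ?_⟩
        have : p - i = (p - (i+1)) + 1 := by omega
        rw [this]; simpa using h2
    · obtain ⟨h1, h2⟩ := ih (i + 1) p h
      refine ⟨by omega, ?_⟩
      have : p - i = (p - (i+1)) + 1 := by omega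
      rw [this]; simpa using h2

theorem pairwise_pvZerosA : ∀ (cs : List Char) (i : Nat), (pvZerosA cs i).Pairwise (· < ·) := by
  intro cs
  induction cs with
  | nil => intro i; simp [pvZerosA]
  | cons c cs ih =>
    intro i
    simp only [pvZerosA]
    split
    · exact List.Pairwise.cons (fun q hq => by have := (mem_pvZerosA cs (i+1) q hq).1; omega) (ih (i+1))
    · exact ih (i + 1)

-- set at an index not touched by pvSetO is unchanged / commutes
theorem getElem?_pvSetO (p : Nat) : ∀ (ps : List Nat) (cs : List Char) (mask idx : Nat),
    p ∉ ps → (pvSetO cs mask idx ps)[p]? = cs[p]? := by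
  intro ps
  induction ps with
  | nil => intro cs mask idx h; rfl
  | cons q rest ih =>
    intro cs mask idx h
    simp only [List.mem_cons, not_or] at h
    simp only [pvSetO]
    rw [ih _ _ _ h.2]
    split
    · exact List.getElem?_set_ne (fun hc => h.1 hc.symm)
    · rfl

theorem length_pvSetO : ∀ (ps : List Nat) (cs : List Char) (mask idx : Nat),
    (pvSetO cs mask idx ps).length = cs.length := by
  intro ps
  induction ps with
  | nil => intro cs mask idx; rfl
  | cons q rest ih =>
    intro cs mask idx
    simp only [pvSetO]
    rw [ih]
    split <;> simp

theorem set_pvSetO_comm (p : Nat) (c : Char) : ∀ (ps : List Nat) (cs : List Char) (mask idx : Nat),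
    p ∉ ps → pvSetO (cs.set p c) mask idx ps = (pvSetO cs mask idx ps).set p c := by
  intro ps
  induction ps with
  | nil => intro cs mask idx h; rfl
  | cons q rest ih =>
    intro cs mask idx h
    simp only [List.mem_cons, not_or] at h
    simp only [pvSetO]
    split
    · rw [List.set_comm _ _ (show p ≠ q from h.1), ih _ _ _ h.2]
    · rw [ih _ _ _ h.2]

theorem pvSetO_shift : ∀ (ps : List Nat) (cs : List Char) (m b idx : Nat), b < 2 →
    pvSetO cs (2 * m + b) (idx + 1) ps = pvSetO cs m idx ps := by
  intro ps
  induction ps with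
  | nil => intro cs m b idx hb; rfl
  | cons q rest ih =>
    intro cs m b idx hb
    simp only [pvSetO]
    have hbit : ((2 * m + b) &&& (1 <<< (idx + 1)) != 0) = (m &&& (1 <<< idx) != 0) := by
      simp only [Nat.one_shiftLeft, Nat.and_two_pow]
      have ht : (2 * m + b).testBit (idx + 1) = m.testBit idx := by
        rw [Nat.testBit_add_one]
        congr 1
        omega
      have h1 : ∀ k : Nat, (2 ^ k != 0) = true := fun k => by
        simp [Nat.pow_eq_zero]
      cases hm : m.testBit idx <;> simp [ht, hm, h1]
    rw [hbit, ih _ _ _ _ hb]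

theorem take_cons_drop_eq_set (l : List Char) (p : Nat) (c : Char) (h : p < l.length) :
    l.take p ++ c :: l.drop (p + 1) = l.set p c := by
  rw [List.set_eq_take_append_cons_drop, if_pos h]

theorem set_self_of_getElem? (l : List Char) (p : Nat) (c : Char) (h : l[p]? = some c) :
    l.set p c = l := by
  apply List.ext_getElem?
  intro n
  rw [List.getElem?_set]
  by_cases he : p = n
  · subst he
    rw [if_pos rfl, if_pos (by exact (List.getElem?_eq_some_iff.mp h).1), h]
  · rw [if_neg he]

theorem foldl_append_pair {α β : Type} (f g : α → β) :
    ∀ (l : List α) (acc : List β),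
    l.foldl (fun acc x => acc ++ [f x, g x]) acc = acc ++ l.flatMap (fun x => [f x, g x]) := by
  intro l
  induction l with
  | nil => intro acc; simp
  | cons x l ih => intro acc; simp [ih, List.flatMap_cons]

theorem range_double : ∀ (n : Nat),
    (List.range n).flatMap (fun m => [2 * m, 2 * m + 1]) = List.range (2 * n) := by
  intro n
  induction n with
  | zero => rfl
  | succ n ih =>
    rw [List.range_succ, List.flatMap_append, ih]
    have : 2 * (n + 1) = (2 * n + 1) + 1 := by ring
    rw [this, List.range_succ, List.range_succ]
    simp [List.flatMap_cons]

theorem pvMain : ∀ (ps : List Nat) (s : List Char),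
    (∀ p ∈ ps, s[p]? = some '0') → ps.Pairwise (· < ·) →
    ps.reverse.foldl (fun variants pos => pvDouble pos variants) [String.ofList s]
      = (List.range (2 ^ ps.length)).map (fun mask => String.ofList (pvSetO s mask 0 ps)) := by
  intro ps
  induction ps with
  | nil =>
    intro s h0 hp
    simp [pvSetO]
  | cons p rest ih =>
    intro s h0 hp
    have hrest : ∀ q ∈ rest, s[q]? = some '0' := fun q hq => h0 q (List.mem_cons_of_mem _ hq)
    have hlt : ∀ q ∈ rest, p < q := (List.pairwise_cons.mp hp).1
    have hpn : p ∉ rest := fun hq => by have := hlt p hq; omega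
    have hsp : s[p]? = some '0' := h0 p List.mem_cons_self
    rw [List.reverse_cons, List.foldl_append]
    rw [ih s hrest (List.pairwise_cons.mp hp).2]
    show pvDouble p _ = _
    unfold pvDouble
    rw [foldl_append_pair, List.nil_append, List.flatMap_map]
    have hlen : (p :: rest).length = rest.length + 1 := rfl
    rw [hlen, pow_succ, mul_comm, ← range_double, List.map_flatMap]
    apply List.flatMap_congr
    intro m _
    have hVp : (pvSetO s m 0 rest)[p]? = some '0' := by
      rw [getElem?_pvSetO p rest s m 0 hpn]; exact hsp
    have hplen : p < (pvSetO s m 0 rest).length := by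
      rw [length_pvSetO]
      exact (List.getElem?_eq_some_iff.mp hsp).1
    have hb0 : ((2 * m) &&& (1 <<< 0) != 0) = false := by
      simp [Nat.and_one_is_mod]
    have hb1 : ((2 * m + 1) &&& (1 <<< 0) != 0) = true := by
      simp [Nat.and_one_is_mod]
    have e0 : pvSetO s (2 * m) 0 (p :: rest) = pvSetO s m 0 rest := by
      simp only [pvSetO, hb0, Bool.false_eq_true, if_false]
      have := pvSetO_shift rest s m 0 0 (by omega)
      simpa using this
    have e1 : pvSetO s (2 * m + 1) 0 (p :: rest) = (pvSetO s m 0 rest).set p 'O' := by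
      simp only [pvSetO, hb1, if_true]
      rw [pvSetO_shift rest (s.set p 'O') m 1 0 (by omega)]
      exact set_pvSetO_comm p 'O' rest s m 0 hpn
    simp only [List.map_cons, List.map_nil, String.toList_ofList, e0, e1]
    rw [take_cons_drop_eq_set _ p '0' hplen, set_self_of_getElem? _ p '0' hVp,
        take_cons_drop_eq_set _ p 'O' hplen]

-- ===== VERDICT (by name: the statement is the Claim_ definition above) =====
theorem generate_zero_o_variants_py_spec : Claim_equal_generate_zero_o_variants_py := by
  intro order_id _
  unfold Spec_generate_zero_o_variants_py
  unfold generate_zero_o_variants_py generate_zero_o_variants_py_alt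
  rw [pvZerosB_eq_A]
  by_cases hE : (pvZerosA order_id.toList 0).isEmpty
  · rw [if_pos hE, List.isEmpty_iff.mp hE]
    rfl
  · rw [if_neg hE]
    have h0 : ∀ p ∈ pvZerosA order_id.toList 0, order_id.toList[p]? = some '0' := by
      intro p hp
      have := mem_pvZerosA order_id.toList 0 p hp
      simpa using this.2
    rw [PySem.List.foldl_append_singleton_eq_map, List.nil_append]
    have := pvMain (pvZerosA order_id.toList 0) order_id.toList h0 (pairwise_pvZerosA _ 0)
    rw [String.ofList_toList] at this
    rw [this]
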